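-- pv_equiv track=rewrite | github.com/Matteo-Candi/Master-Thesis | benchmark/Python_formatted.py | check_for_perfect_square
-- ===== SOURCE A (Python) =====
-- def check_for_perfect_square(arr, i, j):
--     mid, sum = 0, 0
--     for m in range(i, j + 1):
--         sum += arr[m]
--     low, high = 0, sum // 2
--     while low <= high:
--         mid = low + (high - low) // 2
--         if mid * mid == sum:
--             return mid
--         elif mid * mid > sum:
--             high = mid - 1
--         else:
--             low = mid + 1
--     return - 1
-- ===== SOURCE B (Python) =====
-- def check_for_perfect_square(arr, i, j):
--     total = 0
--     for m in range(i, j + 1):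
--         total += arr[m]
--     m = 0
--     while m * m <= total:
--         if m * m == total:
--             return m
--         m += 1
--     return -1
-- ===== Notes on version B (the rewrite author's own statement) =====
-- stated objective: simpler
-- what changed: Replaces the binary search over [0, sum//2] with a plain linear upward scan while m*m <= sum, which also fixes the sum==1 corner that the sum//2 bound silently misses.
-- intended difference: On inputs whose subarray sum arr[i..j] equals exactly 1, A returns -1 because its search range [0, sum//2] = [0,0] excludes 1, while B returns 1; 1 is a perfect square (1*1==1), so B's value is the intended one. — e.g. on check_for_perfect_square([1], 0, 0): A returns -1, B returns 1
import Mathlib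
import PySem

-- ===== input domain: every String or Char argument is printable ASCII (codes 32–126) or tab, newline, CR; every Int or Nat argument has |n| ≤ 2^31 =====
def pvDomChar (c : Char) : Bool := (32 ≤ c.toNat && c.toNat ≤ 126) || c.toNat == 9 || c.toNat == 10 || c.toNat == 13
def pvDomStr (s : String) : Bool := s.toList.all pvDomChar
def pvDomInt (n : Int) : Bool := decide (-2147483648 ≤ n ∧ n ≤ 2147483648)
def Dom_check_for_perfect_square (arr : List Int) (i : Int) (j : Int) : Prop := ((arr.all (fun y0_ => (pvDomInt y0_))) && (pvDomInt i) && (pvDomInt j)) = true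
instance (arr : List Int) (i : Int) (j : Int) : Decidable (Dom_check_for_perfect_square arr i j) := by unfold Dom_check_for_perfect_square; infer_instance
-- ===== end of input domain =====

-- B replaces A's binary search over [0, sum//2] by a linear upward scan while m*m <= sum
-- (simpler); on subarray sums equal to 1 A returns -1 (its bound excludes 1) while B returns
-- the intended 1 — stated as the intended difference D_ below.

-- ===== PORT A =====
-- while low <= high: binary search of A, step for step
def pvBSearch (sum low high : Int) : Int :=
  if _h : low ≤ high then
    let mid := low + PySem.Int.floordiv (high - low) 2
    if mid * mid = sum then mid
    else if mid * mid > sum then pvBSearch sum low (mid - 1)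
    else pvBSearch sum (mid + 1) high
  else -1
termination_by (high + 1 - low).toNat
decreasing_by
  all_goals
    rw [PySem.Int.floordiv_eq_ediv_of_pos (by norm_num : (0:Int) < 2)] at *
    omega

def check_for_perfect_square (arr : List Int) (i : Int) (j : Int) : Int :=
  -- for m in range(i, j+1): sum += arr[m]   (pyGetD is exact under Pre_)
  let sum := (PySem.List.pyRange i (j + 1) 1).foldl
      (fun s m => s + PySem.List.pyGetD arr m 0) 0
  pvBSearch sum 0 (PySem.Int.floordiv sum 2)

-- ===== PORT B =====
-- needed by pvLinScan's termination: m*m ≤ s → m ≤ s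
theorem pv_le_of_sq_le (m s : Int) (h : m * m ≤ s) : m ≤ s := by
  have h1 : 2 * m ≤ m * m + 1 := by nlinarith [mul_self_nonneg (m - 1)]
  have h2 : 0 ≤ m * m := mul_self_nonneg m
  generalize m * m = q at h h1 h2
  omega

-- while m*m <= total: linear upward scan of B, step for step
def pvLinScan (total m : Int) : Int :=
  if h : m * m ≤ total then
    if m * m = total then m else pvLinScan total (m + 1)
  else -1
termination_by (total + 1 - m).toNat
decreasing_by
  have := pv_le_of_sq_le m total h
  omega

def check_for_perfect_square_alt (arr : List Int) (i : Int) (j : Int) : Int :=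
  let total := (PySem.List.pyRange i (j + 1) 1).foldl
      (fun s m => s + PySem.List.pyGetD arr m 0) 0
  pvLinScan total 0

-- ===== PRECONDITION & SPEC =====
-- A raises IndexError iff some index in the contiguous range i..j is out of range;
-- since the range is an interval, validity of the endpoints suffices.
def Pre_check_for_perfect_square (arr : List Int) (i : Int) (j : Int) : Prop :=
  i ≤ j → (-(arr.length : Int) ≤ i ∧ j < (arr.length : Int))
instance (arr : List Int) (i : Int) (j : Int) : Decidable (Pre_check_for_perfect_square arr i j) := by
  unfold Pre_check_for_perfect_square; infer_instance

def pvWitness_check_for_perfect_square : List Int × Int × Int := ([4], 0, 0)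

-- On in-range inputs whose subarray sum arr[i..j] equals exactly 1, A returns -1 because its
-- search range [0, sum//2] = [0,0] excludes 1, while B returns 1; 1 is a perfect square, so
-- B's value is the intended one.
def D_check_for_perfect_square (arr : List Int) (i : Int) (j : Int) : Prop :=
  Pre_check_for_perfect_square arr i j ∧
  (((arr ++ arr).drop (i + (arr.length : Int)).toNat).take ((j + 1 - i).toNat)).sum = 1
instance (arr : List Int) (i : Int) (j : Int) : Decidable (D_check_for_perfect_square arr i j) := by
  unfold D_check_for_perfect_square; infer_instance

def Spec_check_for_perfect_square (arr : List Int) (i : Int) (j : Int) (out : Int) : Prop :=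
  ¬ D_check_for_perfect_square arr i j → out = check_for_perfect_square_alt arr i j
instance (arr : List Int) (i : Int) (j : Int) (out : Int) : Decidable (Spec_check_for_perfect_square arr i j out) := by
  unfold Spec_check_for_perfect_square; infer_instance

def pvDiffWitness_check_for_perfect_square : List Int × Int × Int := ([1], 0, 0)
def pvDiffWitnessOut_check_for_perfect_square : Int × Int := (-1, 1)

-- ===== CLAIM (what is proved, stated in full; the proofs are below) =====
def Claim_unchanged_check_for_perfect_square : Prop := ∀ (arr : List Int) (i : Int) (j : Int), Dom_check_for_perfect_square arr i j → Pre_check_for_perfect_square arr i j → Spec_check_for_perfect_square arr i j (check_for_perfect_square arr i j)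
def Claim_changed_check_for_perfect_square : Prop := Dom_check_for_perfect_square (pvDiffWitness_check_for_perfect_square.1) (pvDiffWitness_check_for_perfect_square.2.1) (pvDiffWitness_check_for_perfect_square.2.2) ∧ Pre_check_for_perfect_square (pvDiffWitness_check_for_perfect_square.1) (pvDiffWitness_check_for_perfect_square.2.1) (pvDiffWitness_check_for_perfect_square.2.2) ∧ D_check_for_perfect_square (pvDiffWitness_check_for_perfect_square.1) (pvDiffWitness_check_for_perfect_square.2.1) (pvDiffWitness_check_for_perfect_square.2.2) ∧ check_for_perfect_square (pvDiffWitness_check_for_perfect_square.1) (pvDiffWitness_check_for_perfect_square.2.1) (pvDiffWitness_check_for_perfect_square.2.2) = pvDiffWitnessOut_check_for_perfect_square.1 ∧ check_for_perfect_square_alt (pvDiffWitness_check_for_perfect_square.1) (pvDiffWitness_check_for_perfect_square.2.1) (pvDiffWitness_check_for_perfect_square.2.2) = pvDiffWitnessOut_check_for_perfect_square.2 ∧ pvDiffWitnessOut_check_for_perfect_square.1 ≠ pvDiffWitnessOut_check_for_perfect_square.2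
def Claim_exact_check_for_perfect_square : Prop := ∀ (arr : List Int) (i : Int) (j : Int), Dom_check_for_perfect_square arr i j → Pre_check_for_perfect_square arr i j → D_check_for_perfect_square arr i j → check_for_perfect_square arr i j ≠ check_for_perfect_square_alt arr i j

-- ===== LEMMAS AND PROOFS =====

-- A's accumulator loop computes the sum of the mapped range (links the ports to D_'s sum).
theorem pv_fold_eq_map_sum (l : List Int) (f : Int → Int) (a : Int) :
    l.foldl (fun s m => s + f m) a = a + (l.map f).sum := by
  induction l generalizing a with
  | nil => simp
  | cons x xs ih => simp [ih]; ring

-- under Pre_, the ports' accumulator sum equals D_'s closed-form subarray sum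
theorem pv_sum_eq (arr : List Int) (i j : Int) (hpre : Pre_check_for_perfect_square arr i j) :
    (PySem.List.pyRange i (j + 1) 1).foldl (fun s m => s + PySem.List.pyGetD arr m 0) 0
    = (((arr ++ arr).drop (i + (arr.length : Int)).toNat).take ((j + 1 - i).toNat)).sum := by
  rw [pv_fold_eq_map_sum, zero_add, PySem.List.pyRange_one]
  by_cases hij : i ≤ j
  · obtain ⟨h1, h2⟩ := hpre hij
    have hlen : 0 < (arr.length : Int) := by omega
    have hlist : ((arr ++ arr).drop (i + (arr.length : Int)).toNat).take ((j + 1 - i).toNat)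
        = (List.range ((j + 1 - i).toNat)).map
            (fun k => (arr ++ arr).getD ((i + (arr.length : Int)).toNat + k) 0) := by
      apply List.ext_getElem
      · simp [List.length_append]; omega
      · intro k hk1 hk2
        simp only [List.getElem_take, List.getElem_drop, List.getElem_map, List.getElem_range]
        rw [List.getD_eq_getElem _ _ (by simp [List.length_append] at *; omega)]
    rw [hlist, List.map_map]
    apply congrArg List.sum
    apply List.map_congr_left
    intro k hk
    have hk' : (k : Int) < j + 1 - i := by
      have := List.mem_range.mp hk; omega
    simp only [Function.comp]
    by_cases hm0 : 0 ≤ i + (k : Int)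
    · rw [PySem.List.pyGetD_eq_getElem arr 0 hm0 (by omega)]
      rw [List.getD_eq_getElem _ _ (by simp [List.length_append]; omega)]
      rw [List.getElem_append_right (by omega : arr.length ≤ (i + (arr.length : Int)).toNat + k)]
      congr 1
      omega
    · obtain ⟨kk, hkk⟩ : ∃ kk : ℕ, i + (k : Int) = -(kk : Int) :=
        ⟨(-(i + (k : Int))).toNat, by omega⟩
      rw [hkk, PySem.List.pyGetD_neg_natCast arr kk 0 (by omega) (by omega)]
      rw [List.getD_eq_getElem _ _ (by simp [List.length_append]; omega)]
      rw [List.getElem_append_left (by omega : (i + (arr.length : Int)).toNat + k < arr.length)]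
      congr 1
      omega
  · simp [show (j + 1 - i).toNat = 0 from by omega]

theorem pv_sq_inj (a b : Int) (ha : 0 ≤ a) (hb : 0 ≤ b) (h : a * a = b * b) : a = b := by
  rcases mul_self_eq_mul_self_iff.mp h with h | h <;> omega

theorem pv_sq_le (a b : Int) (ha : 0 ≤ a) (h : a ≤ b) : a * a ≤ b * b :=
  mul_self_le_mul_self ha h

-- linear scan finds the (unique) nonnegative root when one lies at or above m
theorem pv_ls_found (s r : Int) (hr : 0 ≤ r) (hs : r * r = s) :
    ∀ m, 0 ≤ m → m ≤ r → pvLinScan s m = r := by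
  intro m hm0 hmr
  obtain ⟨k, hk⟩ : ∃ k : ℕ, r - m = k := ⟨(r - m).toNat, by omega⟩
  induction k generalizing m with
  | zero =>
    have hmr' : m = r := by omega
    rw [pvLinScan]; subst hmr'; rw [dif_pos (le_of_eq hs), if_pos hs]
  | succ k ih =>
    have hlt : m < r := by omega
    have h1 : m * m < r * r := mul_self_lt_mul_self hm0 hlt
    rw [pvLinScan, dif_pos (by omega : m * m ≤ s), if_neg (by omega : ¬ m * m = s)]
    exact ih (m + 1) (by omega) (by omega) (by omega)

theorem pv_ls_none (s : Int) (h : ∀ r, 0 ≤ r → r * r ≠ s) :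
    ∀ m, 0 ≤ m → pvLinScan s m = -1 := by
  intro m hm0
  obtain ⟨k, hk⟩ : ∃ k : ℕ, s + 1 - m ≤ k := ⟨(s + 1 - m).toNat, by omega⟩
  induction k generalizing m with
  | zero =>
    rw [pvLinScan, dif_neg]
    intro hle
    have := pv_le_of_sq_le m s hle
    omega
  | succ k ih =>
    rw [pvLinScan]
    by_cases hle : m * m ≤ s
    · rw [dif_pos hle, if_neg (h m hm0)]
      exact ih (m + 1) (by omega) (by omega)
    · rw [dif_neg hle]

-- binary search finds the (unique) nonnegative root when it lies in [low, high]
theorem pv_bs_found (s r : Int) (hr : 0 ≤ r) (hs : r * r = s) :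
    ∀ low high, 0 ≤ low → low ≤ r → r ≤ high → pvBSearch s low high = r := by
  intro low high h0 h1 h2
  obtain ⟨k, hk⟩ : ∃ k : ℕ, high + 1 - low ≤ k := ⟨(high + 1 - low).toNat, by omega⟩
  induction k generalizing low high with
  | zero => omega
  | succ k ih =>
    have hlh : low ≤ high := by omega
    rw [pvBSearch, dif_pos hlh]
    rw [PySem.Int.floordiv_eq_ediv_of_pos (by norm_num : (0:Int) < 2)]
    set mid := low + (high - low) / 2 with hmid
    have hmb : low ≤ mid ∧ mid ≤ high := by constructor <;> omega
    by_cases he : mid * mid = s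
    · rw [if_pos he]
      exact pv_sq_inj mid r (by omega) hr (by omega)
    · rw [if_neg he]
      by_cases hg : mid * mid > s
      · rw [if_pos hg]
        have : r < mid := by
          by_contra hcon
          have := pv_sq_le mid r (by omega) (by omega)
          omega
        exact ih low (mid - 1) h0 h1 (by omega) (by omega)
      · rw [if_neg hg]
        have : mid < r := by
          by_contra hcon
          have := pv_sq_le r mid hr (by omega)
          omega
        exact ih (mid + 1) high (by omega) (by omega) h2 (by omega)

theorem pv_bs_none (s : Int) (h : ∀ r, 0 ≤ r → r * r ≠ s) :
    ∀ low high, 0 ≤ low → pvBSearch s low high = -1 := by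
  intro low high h0
  obtain ⟨k, hk⟩ : ∃ k : ℕ, high + 1 - low ≤ k := ⟨(high + 1 - low).toNat, by omega⟩
  induction k generalizing low high with
  | zero =>
    rw [pvBSearch, dif_neg (by omega : ¬ low ≤ high)]
  | succ k ih =>
    rw [pvBSearch]
    by_cases hlh : low ≤ high
    · rw [dif_pos hlh]
      rw [PySem.Int.floordiv_eq_ediv_of_pos (by norm_num : (0:Int) < 2)]
      set mid := low + (high - low) / 2 with hmid
      have hmb : low ≤ mid ∧ mid ≤ high := by constructor <;> omega
      rw [if_neg (h mid (by omega))]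
      by_cases hg : mid * mid > s
      · rw [if_pos hg]
        exact ih low (mid - 1) h0 (by omega)
      · rw [if_neg hg]
        exact ih (mid + 1) high (by omega) (by omega)
    · rw [dif_neg hlh]

-- the core: for every sum s ≠ 1, A's binary search over [0, s//2] agrees with B's scan
theorem pv_core (s : Int) (hne : s ≠ 1) :
    pvBSearch s 0 (PySem.Int.floordiv s 2) = pvLinScan s 0 := by
  by_cases h : ∃ r, 0 ≤ r ∧ r * r = s
  · obtain ⟨r, hr0, hrs⟩ := h
    have hr1 : r ≠ 1 := by rintro rfl; simp at hrs; omega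
    have hs0 : 0 ≤ s := by rw [← hrs]; exact mul_self_nonneg r
    have hbound : r ≤ PySem.Int.floordiv s 2 := by
      rw [PySem.Int.floordiv_eq_ediv_of_pos (by norm_num : (0:Int) < 2)]
      rw [Int.le_ediv_iff_mul_le (by norm_num : (0:Int) < 2)]
      rcases (by omega : r = 0 ∨ 2 ≤ r) with h2 | h2
      · omega
      · calc r * 2 ≤ r * r := by
              exact mul_le_mul_of_nonneg_left h2 hr0
          _ = s := hrs
    rw [pv_bs_found s r hr0 hrs 0 _ le_rfl hr0 hbound,
        pv_ls_found s r hr0 hrs 0 le_rfl hr0]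
  · push Not at h
    rw [pv_bs_none s h 0 _ le_rfl, pv_ls_none s h 0 le_rfl]

-- evaluations at the witness ([1], 0, 0): subarray sum 1
theorem pv_bs_one : pvBSearch 1 0 0 = -1 := by
  rw [pvBSearch, dif_pos (le_refl (0:Int))]
  norm_num [PySem.Int.floordiv]
  rw [pvBSearch, dif_neg (by norm_num : ¬ (1:Int) ≤ 0)]

theorem pv_ls_one : pvLinScan 1 0 = 1 := pv_ls_found 1 1 one_pos.le (by norm_num) 0 le_rfl one_pos.le

-- ===== VERDICT (by name: the statement is the Claim_ definition above) =====
theorem check_for_perfect_square_spec : Claim_unchanged_check_for_perfect_square := by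
  intro arr i j _hdom hpre hnd
  unfold check_for_perfect_square check_for_perfect_square_alt
  unfold D_check_for_perfect_square at hnd
  rw [pv_sum_eq arr i j hpre]
  exact pv_core _ (fun h => hnd ⟨hpre, h⟩)

theorem check_for_perfect_square_changed : Claim_changed_check_for_perfect_square := by
  unfold Claim_changed_check_for_perfect_square
  refine ⟨by decide, by decide, by decide, ?_, ?_, by decide⟩
  · show check_for_perfect_square [1] 0 0 = -1
    unfold check_for_perfect_square
    have h1 : (PySem.List.pyRange 0 (0 + 1) 1).foldl
        (fun s m => s + PySem.List.pyGetD [(1:Int)] m 0) 0 = 1 := by decide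
    rw [h1]
    show pvBSearch 1 0 (PySem.Int.floordiv 1 2) = -1
    have h2 : PySem.Int.floordiv 1 2 = 0 := by decide
    rw [h2]; exact pv_bs_one
  · show check_for_perfect_square_alt [1] 0 0 = 1
    unfold check_for_perfect_square_alt
    have h1 : (PySem.List.pyRange 0 (0 + 1) 1).foldl
        (fun s m => s + PySem.List.pyGetD [(1:Int)] m 0) 0 = 1 := by decide
    rw [h1]
    show pvLinScan 1 0 = 1
    exact pv_ls_one

theorem check_for_perfect_square_tight : Claim_exact_check_for_perfect_square := by
  intro arr i j _hdom hpre hd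
  unfold check_for_perfect_square check_for_perfect_square_alt
  unfold D_check_for_perfect_square at hd
  rw [pv_sum_eq arr i j hpre, hd.2]
  show pvBSearch 1 0 (PySem.Int.floordiv 1 2) ≠ pvLinScan 1 0
  have h2 : PySem.Int.floordiv 1 2 = 0 := by decide
  rw [h2, pv_bs_one, pv_ls_one]
  decide
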